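-- pv_equiv track=rewrite | github.com/javokhirbek1999/CodeSignal | Arcade/The-Core/Loop-Tunnel/Lineup.py | lineUp
-- ===== SOURCE A (Python) =====
-- def lineUp(commands):
--     students = ['F','F','F','F']
--     count = 0
--     for i in commands:
--         for j in range(len(students)):
--             if i == 'L':
--                 if j == 1:
--                     if students[j] == 'F':
--                         students[j] = 'R'
--                     elif students[j] == 'R':
--                         students[j] = 'B'
--                     elif students[j] == 'B':
--                         students[j] = 'L'
--                     elif students[j] == 'L':
--                         students[j] = 'F'
--                 else:
--                     if students[j] == 'F':
--                         students[j] = 'L'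
--                     elif students[j] == 'L':
--                         students[j] = 'B'
--                     elif students[j] == 'B':
--                         students[j] = 'R'
--                     elif students[j] == 'R':
--                         students[j] = 'F'
--             elif i == 'R':
--                 if j == 1:
--                     if students[j] == 'F':
--                         students[j] = 'L'
--                     elif students[j] == 'L':
--                         students[j] = 'B'
--                     elif students[j] == 'B':
--                         students[j] = 'R'
--                     elif students[j] == 'R':
--                         students[j] = 'F'
--                 else:
--                     if students[j] == 'F':
--                         students[j] = 'R'
--                     elif students[j] == 'R':
--                         students[j] = 'B'
--                     elif students[j] == 'B':
--                         students[j] = 'L'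
--                     elif students[j] == 'L':
--                         students[j] = 'F'
--             else:
--                 pass
--         if len(set(students)) == 1:
--             count += 1
--     return count
-- ===== SOURCE B (Python) =====
-- def lineUp(commands):
--     turns = 0
--     count = 0
--     for c in commands:
--         if c == 'L' or c == 'R':
--             turns += 1
--         if turns % 2 == 0:
--             count += 1
--     return count
-- ===== Notes on version B (the rewrite author's own statement) =====
-- stated objective: faster
-- what changed: B drops the simulated list of four student directions and the per-command set construction: since every L/R command flips whether all four face the same way, B keeps one integer counting turning commands and adds 1 whenever that counter is even (constant-factor speedup: no list/set work per command).
import Mathlib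
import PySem

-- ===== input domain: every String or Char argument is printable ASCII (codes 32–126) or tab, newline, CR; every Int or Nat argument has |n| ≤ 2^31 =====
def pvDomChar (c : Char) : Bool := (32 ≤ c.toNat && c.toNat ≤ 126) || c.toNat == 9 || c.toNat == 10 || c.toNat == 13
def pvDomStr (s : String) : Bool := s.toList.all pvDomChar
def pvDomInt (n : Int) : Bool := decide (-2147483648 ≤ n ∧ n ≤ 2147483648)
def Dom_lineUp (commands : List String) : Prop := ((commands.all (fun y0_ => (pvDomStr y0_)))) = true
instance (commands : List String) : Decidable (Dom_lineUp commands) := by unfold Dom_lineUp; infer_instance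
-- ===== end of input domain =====

-- B replaces A's simulated 4-student state and per-step set construction by a single
-- parity counter of turning commands (simpler; same O(n) cost).

-- ===== PORT A =====
-- inner 'for j in range(len(students))' loop of A, transliterated branch for branch
def lineUpInner (i : String) (students0 : List String) : List String :=
  (PySem.List.pyRange 0 (students0.length : Int) 1).foldl (fun students j =>
    if i == "L" then
      if j == 1 then
        if PySem.List.pyGetD students j "" == "F" then PySem.List.pySetD students j "R"
        else if PySem.List.pyGetD students j "" == "R" then PySem.List.pySetD students j "B"
        else if PySem.List.pyGetD students j "" == "B" then PySem.List.pySetD students j "L"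
        else if PySem.List.pyGetD students j "" == "L" then PySem.List.pySetD students j "F"
        else students
      else
        if PySem.List.pyGetD students j "" == "F" then PySem.List.pySetD students j "L"
        else if PySem.List.pyGetD students j "" == "L" then PySem.List.pySetD students j "B"
        else if PySem.List.pyGetD students j "" == "B" then PySem.List.pySetD students j "R"
        else if PySem.List.pyGetD students j "" == "R" then PySem.List.pySetD students j "F"
        else students
    else if i == "R" then
      if j == 1 then
        if PySem.List.pyGetD students j "" == "F" then PySem.List.pySetD students j "L"
        else if PySem.List.pyGetD students j "" == "L" then PySem.List.pySetD students j "B"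
        else if PySem.List.pyGetD students j "" == "B" then PySem.List.pySetD students j "R"
        else if PySem.List.pyGetD students j "" == "R" then PySem.List.pySetD students j "F"
        else students
      else
        if PySem.List.pyGetD students j "" == "F" then PySem.List.pySetD students j "R"
        else if PySem.List.pyGetD students j "" == "R" then PySem.List.pySetD students j "B"
        else if PySem.List.pyGetD students j "" == "B" then PySem.List.pySetD students j "L"
        else if PySem.List.pyGetD students j "" == "L" then PySem.List.pySetD students j "F"
        else students
    else students) students0

def lineUpBody (p : List String × Int) (i : String) : List String × Int :=
  let students := lineUpInner i p.1
  (students, if PySem.Set.len (PySem.Set.ofList students) == 1 then p.2 + 1 else p.2)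

def lineUp (commands : List String) : Int :=
  (commands.foldl lineUpBody (["F", "F", "F", "F"], 0)).2

-- ===== PORT B =====
def lineUpAltBody (p : Int × Int) (c : String) : Int × Int :=
  let turns := if c == "L" || c == "R" then p.1 + 1 else p.1
  (turns, if turns % 2 == 0 then p.2 + 1 else p.2)

def lineUp_alt (commands : List String) : Int :=
  (commands.foldl lineUpAltBody (0, 0)).2

-- ===== PRECONDITION & SPEC =====
def Spec_lineUp (commands : List String) (out : Int) : Prop := out = lineUp_alt commands
instance (commands : List String) (out : Int) : Decidable (Spec_lineUp commands out) := by unfold Spec_lineUp; infer_instance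

-- ===== CLAIM (what is proved, stated in full; the proofs are below) =====
def Claim_equal_lineUp : Prop := ∀ (commands : List String), Dom_lineUp commands → Spec_lineUp commands (lineUp commands)

-- ===== LEMMAS AND PROOFS =====
-- the four reachable student states: stateOf k for k = turns-mod-4 under repeated 'L'
def stateOf (k : Int) : List String :=
  if k = 0 then ["F", "F", "F", "F"]
  else if k = 1 then ["L", "R", "L", "L"]
  else if k = 2 then ["B", "B", "B", "B"]
  else ["R", "L", "R", "R"]

theorem inner_L (k : Int) (h0 : 0 ≤ k) (h4 : k < 4) :
    lineUpInner "L" (stateOf k) = stateOf ((k + 1) % 4) := by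
  interval_cases k <;> decide

theorem inner_R (k : Int) (h0 : 0 ≤ k) (h4 : k < 4) :
    lineUpInner "R" (stateOf k) = stateOf ((k + 3) % 4) := by
  interval_cases k <;> decide

theorem inner_other (c : String) (hL : c ≠ "L") (hR : c ≠ "R") (k : Int)
    (h0 : 0 ≤ k) (h4 : k < 4) : lineUpInner c (stateOf k) = stateOf k := by
  have hL' : (c == "L") = false := beq_eq_false_iff_ne.mpr hL
  have hR' : (c == "R") = false := beq_eq_false_iff_ne.mpr hR
  have hr : PySem.List.pyRange 0 ((stateOf k).length : Int) 1 = [0, 1, 2, 3] := by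
    interval_cases k <;> decide
  simp [lineUpInner, hr, hL', hR', List.foldl]

theorem chk_state (k : Int) (h0 : 0 ≤ k) (h4 : k < 4) :
    (PySem.Set.len (PySem.Set.ofList (stateOf k)) == 1) = decide (k % 2 = 0) := by
  interval_cases k <;> decide

theorem main_lemma : ∀ (cs : List String) (k t count : Int), 0 ≤ k → k < 4 →
    k % 2 = t % 2 →
    (cs.foldl lineUpBody (stateOf k, count)).2 = (cs.foldl lineUpAltBody (t, count)).2 := by
  intro cs
  induction cs with
  | nil => intro k t count _ _ _; rfl
  | cons c cs ih =>
    intro k t count h0 h4 hpar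
    by_cases hL : c = "L"
    · subst hL
      have hstep : lineUpBody (stateOf k, count) "L" =
          (stateOf ((k + 1) % 4),
            if (PySem.Set.len (PySem.Set.ofList (stateOf ((k + 1) % 4))) == 1)
              then count + 1 else count) := by
        simp [lineUpBody, inner_L k h0 h4]
      have hk0 : 0 ≤ (k + 1) % 4 := by omega
      have hk4 : (k + 1) % 4 < 4 := by omega
      have hcond : (PySem.Set.len (PySem.Set.ofList (stateOf ((k + 1) % 4))) == 1)
          = decide ((t + 1) % 2 = 0) := by
        rw [chk_state _ hk0 hk4, decide_eq_decide]
        omega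
      have hstepB : lineUpAltBody (t, count) "L" =
          (t + 1, if (t + 1) % 2 == 0 then count + 1 else count) := by
        simp [lineUpAltBody]
      simp only [List.foldl_cons, hstep, hstepB, hcond]
      have hcondB : ((t + 1) % 2 == 0) = decide ((t + 1) % 2 = 0) := by
        by_cases h : (t + 1) % 2 = 0 <;> simp [h]
      rw [hcondB]
      exact ih ((k + 1) % 4) (t + 1) _ hk0 hk4 (by omega)
    · by_cases hR : c = "R"
      · subst hR
        have hstep : lineUpBody (stateOf k, count) "R" =
            (stateOf ((k + 3) % 4),
              if (PySem.Set.len (PySem.Set.ofList (stateOf ((k + 3) % 4))) == 1)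
                then count + 1 else count) := by
          simp [lineUpBody, inner_R k h0 h4]
        have hk0 : 0 ≤ (k + 3) % 4 := by omega
        have hk4 : (k + 3) % 4 < 4 := by omega
        have hcond : (PySem.Set.len (PySem.Set.ofList (stateOf ((k + 3) % 4))) == 1)
            = decide ((t + 1) % 2 = 0) := by
          rw [chk_state _ hk0 hk4, decide_eq_decide]
          omega
        have hstepB : lineUpAltBody (t, count) "R" =
            (t + 1, if (t + 1) % 2 == 0 then count + 1 else count) := by
          simp [lineUpAltBody]
        simp only [List.foldl_cons, hstep, hstepB, hcond]
        have hcondB : ((t + 1) % 2 == 0) = decide ((t + 1) % 2 = 0) := by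
          by_cases h : (t + 1) % 2 = 0 <;> simp [h]
        rw [hcondB]
        exact ih ((k + 3) % 4) (t + 1) _ hk0 hk4 (by omega)
      · have hstep : lineUpBody (stateOf k, count) c =
            (stateOf k,
              if (PySem.Set.len (PySem.Set.ofList (stateOf k)) == 1)
                then count + 1 else count) := by
          simp [lineUpBody, inner_other c hL hR k h0 h4]
        have hcond : (PySem.Set.len (PySem.Set.ofList (stateOf k)) == 1)
            = decide (t % 2 = 0) := by
          rw [chk_state _ h0 h4, decide_eq_decide]
          omega
        have hL' : (c == "L") = false := beq_eq_false_iff_ne.mpr hL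
        have hR' : (c == "R") = false := beq_eq_false_iff_ne.mpr hR
        have hstepB : lineUpAltBody (t, count) c =
            (t, if t % 2 == 0 then count + 1 else count) := by
          simp [lineUpAltBody, hL', hR']
        simp only [List.foldl_cons, hstep, hstepB, hcond]
        have hcondB : (t % 2 == 0) = decide (t % 2 = 0) := by
          by_cases h : t % 2 = 0 <;> simp [h]
        rw [hcondB]
        exact ih k t _ h0 h4 hpar

-- ===== VERDICT (by name: the statement is the Claim_ definition above) =====
theorem lineUp_spec : Claim_equal_lineUp := by
  intro commands _
  unfold Spec_lineUp lineUp lineUp_alt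
  have h := main_lemma commands 0 0 0 (by omega) (by omega) (by omega)
  simpa [stateOf] using h
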